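-- pv_equiv track=rewrite | github.com/AslamkhonK/My-Project-Dashboard | olist_streamlit_dashboard/db.py | _load_named_queries
-- ===== SOURCE A (Python) =====
-- def _load_named_queries(sql_text: str) -> dict[str, str]:
--     """
--     Parse named queries from SQL file blocks marked as:
--     -- name: query_name
--
--     Returns:
--         Dict mapping query_name -> query_sql
--     """
--     queries: dict[str, str] = {}
--     current_name = None
--     current_lines: list[str] = []
--
--     for line in sql_text.splitlines():
--         if line.strip().lower().startswith("-- name:"):
--             # flush previous
--             if current_name and current_lines:
--                 queries[current_name] = "\n".join(current_lines).strip()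
--             current_name = line.split(":", 1)[1].strip()
--             current_lines = []
--         else:
--             if current_name is not None:
--                 current_lines.append(line)
--
--     if current_name and current_lines:
--         queries[current_name] = "\n".join(current_lines).strip()
--
--     return queries
-- ===== SOURCE B (Python) =====
-- def _load_named_queries(sql_text: str) -> dict[str, str]:
--     """Two-pass: first collect (name, marker_index) for every '-- name:' line,
--     then slice each block's body lines between consecutive markers."""
--     lines = sql_text.splitlines()
--     markers = [
--         (line.split(":", 1)[1].strip(), i)
--         for i, line in enumerate(lines)
--         if line.strip().lower().startswith("-- name:")
--     ]
--     queries: dict[str, str] = {}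
--     for k, (name, m) in enumerate(markers):
--         end = markers[k + 1][1] if k + 1 < len(markers) else len(lines)
--         body = lines[m + 1 : end]
--         if name and body:
--             queries[name] = "\n".join(body).strip()
--     return queries
-- ===== Notes on version B (the rewrite author's own statement) =====
-- stated objective: alternative
-- what changed: Replaces A's single-pass accumulator state machine (current_name/current_lines flushed at each marker and at EOF) by a two-phase plan: first build an index of (name, line_number) markers, then slice each block's body lines between consecutive markers.
import Mathlib
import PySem

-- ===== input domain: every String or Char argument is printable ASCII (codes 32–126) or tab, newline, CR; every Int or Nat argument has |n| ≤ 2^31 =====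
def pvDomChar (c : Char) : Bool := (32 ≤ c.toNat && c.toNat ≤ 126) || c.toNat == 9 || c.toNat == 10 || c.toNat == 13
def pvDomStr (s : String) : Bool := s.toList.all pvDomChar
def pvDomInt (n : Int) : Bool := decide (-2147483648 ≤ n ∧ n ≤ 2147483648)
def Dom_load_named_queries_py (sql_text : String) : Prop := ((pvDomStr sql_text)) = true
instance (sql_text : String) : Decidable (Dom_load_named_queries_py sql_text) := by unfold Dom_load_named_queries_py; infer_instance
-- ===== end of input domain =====

-- B is an alternative decomposition: a two-phase marker-index-and-slice parser instead of A's
-- single-pass accumulator state machine; same cost, equal output.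

-- ===== PORT A =====
-- line.strip().lower().startswith("-- name:")
def pvIsMarker (line : String) : Bool :=
  PySem.Str.startswith (PySem.Str.lower (PySem.Str.strip line)) "-- name:"

-- line.split(":", 1)[1].strip(); on a marker line ":" occurs in line, so the split has a
-- part at index 1 and the default "" of getD is never used — exact there.
def pvMarkerName (line : String) : String :=
  PySem.Str.strip (((PySem.Str.splitMax? line ":" 1).getD []).getD 1 "")

-- the flush 'if current_name and current_lines: queries[current_name] = "\n".join(...).strip()'
def pvFlushA (d : PySem.Dict String String) (cur : Option String) (acc : List String) :
    PySem.Dict String String :=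
  match cur with
  | some n => if n ≠ "" ∧ acc ≠ [] then d.insert n (PySem.Str.strip (PySem.Str.join "\n" acc)) else d
  | none => d

-- the for-loop over the lines; the [] case is the post-loop flush
def pvLoopA (ls : List String) (d : PySem.Dict String String) (cur : Option String)
    (acc : List String) : PySem.Dict String String :=
  match ls with
  | [] => pvFlushA d cur acc
  | l :: ls =>
      if pvIsMarker l then
        pvLoopA ls (pvFlushA d cur acc) (some (pvMarkerName l)) []
      else
        pvLoopA ls d cur (if cur.isSome then acc ++ [l] else acc)

def load_named_queries_py (sql_text : String) : List (String × String) :=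
  (pvLoopA (PySem.Str.splitlines sql_text) PySem.Dict.empty none []).items

-- ===== PORT B =====
-- the second pass: for each marker, end = next marker's line index (markers[k+1][1],
-- i.e. the head of the remaining marker list) or len(lines); body = lines[m+1:end]
def pvLoopB (lines : List String) (markers : List (String × Int))
    (d : PySem.Dict String String) : PySem.Dict String String :=
  match markers with
  | [] => d
  | (n, m) :: rest =>
      let e : Int := match rest with | [] => (lines.length : Int) | (_, m') :: _ => m'
      let body := PySem.List.slice lines (some (m + 1)) (some e)
      pvLoopB lines rest
        (if n ≠ "" ∧ body ≠ [] then d.insert n (PySem.Str.strip (PySem.Str.join "\n" body)) else d)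

def load_named_queries_py_alt (sql_text : String) : List (String × String) :=
  let lines := PySem.Str.splitlines sql_text
  let markers := ((PySem.List.enumerate lines 0).filter (fun p => pvIsMarker p.2)).map
      (fun p => (pvMarkerName p.2, p.1))
  (pvLoopB lines markers PySem.Dict.empty).items

-- ===== PRECONDITION & SPEC =====
def Spec_load_named_queries_py (sql_text : String) (out : List (String × String)) : Prop := out = load_named_queries_py_alt sql_text
instance (sql_text : String) (out : List (String × String)) : Decidable (Spec_load_named_queries_py sql_text out) := by unfold Spec_load_named_queries_py; infer_instance

-- ===== CLAIM (what is proved, stated in full; the proofs are below) =====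
def Claim_equal_load_named_queries_py : Prop := ∀ (sql_text : String), Dom_load_named_queries_py sql_text → Spec_load_named_queries_py sql_text (load_named_queries_py sql_text)

-- ===== LEMMAS AND PROOFS =====

-- proof-side canonical form: the (name, body-lines) blocks of the line list, in order
def pvBlocks (ls : List String) : List (String × List String) :=
  match ls with
  | [] => []
  | l :: ls =>
      if pvIsMarker l then (pvMarkerName l, ls.takeWhile (fun x => !pvIsMarker x)) :: pvBlocks ls
      else pvBlocks ls

def pvStep (d : PySem.Dict String String) (b : String × List String) : PySem.Dict String String :=
  if b.1 ≠ "" ∧ b.2 ≠ [] then d.insert b.1 (PySem.Str.strip (PySem.Str.join "\n" b.2)) else d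

def pvFold (d : PySem.Dict String String) (bs : List (String × List String)) :
    PySem.Dict String String :=
  bs.foldl pvStep d

-- proof-side marker index with an Int offset
def pvMkrs (i : Int) (ls : List String) : List (String × Int) :=
  match ls with
  | [] => []
  | l :: ls => if pvIsMarker l then (pvMarkerName l, i) :: pvMkrs (i + 1) ls else pvMkrs (i + 1) ls

theorem pvLoopA_some (ls : List String) : ∀ (d : PySem.Dict String String) (n : String)
    (acc : List String),
    pvLoopA ls d (some n) acc =
      pvFold (pvStep d (n, acc ++ ls.takeWhile (fun x => !pvIsMarker x))) (pvBlocks ls) := by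
  induction ls with
  | nil => intro d n acc; simp [pvLoopA, pvFlushA, pvBlocks, pvFold, pvStep]
  | cons l ls ih =>
      intro d n acc
      by_cases h : pvIsMarker l
      · simp [pvLoopA, h, pvBlocks, pvFold, pvFlushA, pvStep, ih]
      · simp [pvLoopA, h, pvBlocks, ih]

theorem pvLoopA_none (ls : List String) : ∀ (d : PySem.Dict String String) (acc : List String),
    pvLoopA ls d none acc = pvFold d (pvBlocks ls) := by
  induction ls with
  | nil => intro d acc; simp [pvLoopA, pvFlushA, pvBlocks, pvFold]
  | cons l ls ih =>
      intro d acc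
      by_cases h : pvIsMarker l
      · simp [pvLoopA, h, pvFlushA, pvLoopA_some, pvBlocks, pvFold]
      · simp [pvLoopA, h, pvBlocks, ih]

theorem pvMkrs_enum (ls : List String) : ∀ (i : Int),
    ((PySem.List.enumerate ls i).filter (fun p => pvIsMarker p.2)).map
      (fun p => (pvMarkerName p.2, p.1)) = pvMkrs i ls := by
  induction ls with
  | nil => intro i; simp [PySem.List.enumerate_nil, pvMkrs]
  | cons l ls ih =>
      intro i
      by_cases h : pvIsMarker l
      · simp [PySem.List.enumerate_cons, h, pvMkrs, ih]
      · simp [PySem.List.enumerate_cons, h, pvMkrs, ih]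

theorem pvMkrs_nil_iff (ls : List String) : ∀ (i : Int),
    pvMkrs i ls = [] → ls.takeWhile (fun x => !pvIsMarker x) = ls := by
  induction ls with
  | nil => intro i _; rfl
  | cons l ls ih =>
      intro i h
      by_cases hm : pvIsMarker l
      · simp [pvMkrs, hm] at h
      · simp [pvMkrs, hm] at h
        simp [List.takeWhile, hm, ih _ h]

theorem pvMkrs_head (ls : List String) : ∀ (j : ℕ) (n' : String) (m' : Int)
    (rest : List (String × Int)), pvMkrs (j : Int) ls = (n', m') :: rest →
    ∃ t : ℕ, m' = ((j + t : ℕ) : Int) ∧ ls.take t = ls.takeWhile (fun x => !pvIsMarker x) := by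
  induction ls with
  | nil => intro j n' m' rest h; simp [pvMkrs] at h
  | cons l ls ih =>
      intro j n' m' rest h
      by_cases hm : pvIsMarker l
      · simp [pvMkrs, hm] at h
        refine ⟨0, by simp [h.1.2], ?_⟩
        simp [List.takeWhile, hm]
      · simp [pvMkrs, hm] at h
        have h' : pvMkrs ((j + 1 : ℕ) : Int) ls = (n', m') :: rest := by
          rw [show ((j + 1 : ℕ) : Int) = (j : Int) + 1 from by push_cast; ring]; exact h
        obtain ⟨t, ht, htake⟩ := ih (j + 1) n' m' rest h'
        refine ⟨t + 1, by push_cast at ht ⊢; omega, ?_⟩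
        simp [List.takeWhile, hm, htake]

theorem pvLoopB_mkrs (lines : List String) (ls : List String) : ∀ (j : ℕ),
    lines.drop j = ls → ∀ (d : PySem.Dict String String),
    pvLoopB lines (pvMkrs (j : Int) ls) d = pvFold d (pvBlocks ls) := by
  induction ls with
  | nil => intro j _ d; simp [pvMkrs, pvLoopB, pvBlocks, pvFold]
  | cons l ls ih =>
      intro j hdrop d
      have hdrop' : lines.drop (j + 1) = ls := by
        rw [← List.tail_drop, hdrop]; rfl
      by_cases hm : pvIsMarker l
      · rw [show pvMkrs (j : Int) (l :: ls) = (pvMarkerName l, (j : Int)) :: pvMkrs ((j : Int) + 1) ls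
            from by simp [pvMkrs, hm]]
        have hcast : ((j : Int) + 1) = ((j + 1 : ℕ) : Int) := by push_cast; ring
        have hbody : PySem.List.slice lines (some ((j : Int) + 1))
            (some (match pvMkrs ((j : Int) + 1) ls with
                   | [] => (lines.length : Int) | (_, m') :: _ => m')) =
            ls.takeWhile (fun x => !pvIsMarker x) := by
          rcases hrest : pvMkrs ((j : Int) + 1) ls with _ | ⟨⟨n', m'⟩, rest⟩
          · rw [hcast] at hrest ⊢
            rw [PySem.List.slice_natCast]
            rw [hdrop', pvMkrs_nil_iff ls _ hrest]
            have : ls.length ≤ lines.length - (j + 1) := by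
              have := hdrop' ▸ (List.length_drop (l := lines) (i := j + 1)); omega
            exact List.take_of_length_le this
          · rw [hcast] at hrest ⊢
            obtain ⟨t, ht, htake⟩ := pvMkrs_head ls (j + 1) n' m' rest hrest
            rw [ht, PySem.List.slice_natCast, hdrop']
            rw [show j + 1 + t - (j + 1) = t from by omega, htake]
        simp only [pvLoopB, pvBlocks, hm]
        rw [hbody]
        rw [hcast]
        rw [ih (j + 1) hdrop']
        simp [pvFold, pvStep]
      · rw [show pvMkrs (j : Int) (l :: ls) = pvMkrs ((j : Int) + 1) ls from by simp [pvMkrs, hm]]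
        rw [show ((j : Int) + 1) = ((j + 1 : ℕ) : Int) from by push_cast; ring]
        rw [ih (j + 1) hdrop' d]
        simp [pvBlocks, hm]

-- ===== VERDICT (by name: the statement is the Claim_ definition above) =====
theorem load_named_queries_py_spec : Claim_equal_load_named_queries_py := by
  intro s _
  unfold Spec_load_named_queries_py
  simp only [load_named_queries_py, load_named_queries_py_alt]
  rw [pvMkrs_enum]
  rw [show (0 : Int) = ((0 : ℕ) : Int) from rfl]
  rw [pvLoopB_mkrs (PySem.Str.splitlines s) (PySem.Str.splitlines s) 0 rfl]
  rw [pvLoopA_none]
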